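-- pv_equiv track=rewrite | github.com/CosminHorjea/fmi | Sem I/Programarea Algoritmilor/laboratoare/lab4/problema11.py | punctulB
-- ===== SOURCE A (Python) =====
-- def alipire(*argv):
--     rez = 0
--     for numar in argv:
--         cifMax = 0
--         while(numar > 0):
--             cif = numar % 10
--             if(cif > cifMax):
--                 cifMax = cif
--             numar //= 10
--         rez *= 10
--         rez += cifMax
--     return rez
--
-- def punctulB(a, b, c):
--     temp = alipire(a, b, c)
--     suma = 0
--     while(temp > 0):
--         suma += temp % 10
--         temp //= 10
--     if(suma < 4):
--         return True
--     return False
-- ===== SOURCE B (Python) =====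
-- def maxdigit(n):
--     m = 0
--     while n > 0:
--         m = max(m, n % 10)
--         n //= 10
--     return m
--
-- def punctulB(a, b, c):
--     return (maxdigit(a) + maxdigit(b) + maxdigit(c)) < 4
-- ===== Notes on version B (the rewrite author's own statement) =====
-- stated objective: simpler
-- what changed: B sums the per-argument max digits directly and compares with 4, skipping A's base-10 packing of the three max digits into one number and the second loop that re-decomposes it into its digit sum.
import Mathlib
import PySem

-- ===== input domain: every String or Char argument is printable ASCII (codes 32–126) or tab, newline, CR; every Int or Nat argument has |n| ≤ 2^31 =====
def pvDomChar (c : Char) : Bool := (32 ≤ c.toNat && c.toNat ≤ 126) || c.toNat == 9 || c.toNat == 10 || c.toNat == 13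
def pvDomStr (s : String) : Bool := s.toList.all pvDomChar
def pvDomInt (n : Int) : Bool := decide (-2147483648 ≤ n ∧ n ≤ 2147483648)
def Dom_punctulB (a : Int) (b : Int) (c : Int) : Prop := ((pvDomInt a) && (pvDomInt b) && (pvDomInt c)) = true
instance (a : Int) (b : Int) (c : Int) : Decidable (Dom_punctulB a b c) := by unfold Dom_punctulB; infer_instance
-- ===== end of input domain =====

-- B sums the three per-argument max digits directly and compares with 4, skipping A's
-- base-10 packing of the max digits into one number and the loop that re-decomposes it
-- into its digit sum (objective: simpler).

-- ===== PORT A =====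
-- inner 'while numar > 0' loop of alipire, carrying cifMax
def pvAMaxLoop (numar : Int) (cifMax : Int) : Int :=
  if numar > 0 then
    -- cif = numar % 10 inlined
    pvAMaxLoop (PySem.Int.floordiv numar 10)
      (if PySem.Int.mod numar 10 > cifMax then PySem.Int.mod numar 10 else cifMax)
  else cifMax
termination_by numar.toNat
decreasing_by
  rw [PySem.Int.floordiv_eq_ediv_of_pos (by norm_num)]
  omega

-- alipire(*argv) : for-loop over argv folding rez
def alipire (argv : List Int) : Int :=
  argv.foldl (fun rez numar => rez * 10 + pvAMaxLoop numar 0) 0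

-- 'while temp > 0' digit-sum loop of punctulB
def pvASumLoop (temp : Int) (suma : Int) : Int :=
  if temp > 0 then
    pvASumLoop (PySem.Int.floordiv temp 10) (suma + PySem.Int.mod temp 10)
  else suma
termination_by temp.toNat
decreasing_by
  rw [PySem.Int.floordiv_eq_ediv_of_pos (by norm_num)]
  omega

def punctulB (a : Int) (b : Int) (c : Int) : Bool :=
  let temp := alipire [a, b, c]
  let suma := pvASumLoop temp 0
  if suma < 4 then true else false

-- ===== PORT B =====
-- maxdigit's while loop: m = max(m, n % 10); n //= 10
def pvBMdLoop (n : Int) (m : Int) : Int :=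
  if n > 0 then pvBMdLoop (PySem.Int.floordiv n 10) (max m (PySem.Int.mod n 10)) else m
termination_by n.toNat
decreasing_by
  rw [PySem.Int.floordiv_eq_ediv_of_pos (by norm_num)]
  omega

def maxdigit (n : Int) : Int := pvBMdLoop n 0

def punctulB_alt (a : Int) (b : Int) (c : Int) : Bool :=
  decide (maxdigit a + maxdigit b + maxdigit c < 4)

-- ===== PRECONDITION & SPEC =====
def Spec_punctulB (a : Int) (b : Int) (c : Int) (out : Bool) : Prop := out = punctulB_alt a b c
instance (a : Int) (b : Int) (c : Int) (out : Bool) : Decidable (Spec_punctulB a b c out) := by unfold Spec_punctulB; infer_instance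

-- ===== CLAIM (what is proved, stated in full; the proofs are below) =====
def Claim_equal_punctulB : Prop := ∀ (a : Int) (b : Int) (c : Int), Dom_punctulB a b c → Spec_punctulB a b c (punctulB a b c)

-- ===== LEMMAS AND PROOFS =====

-- A's max-digit loop and B's compute the same value
theorem pvAMaxLoop_eq_pvBMdLoop (n m : Int) : pvAMaxLoop n m = pvBMdLoop n m := by
  induction n, m using pvAMaxLoop.induct with
  | case1 n m h ih =>
    rw [pvAMaxLoop, pvBMdLoop, if_pos h, if_pos h]
    have heq : (if PySem.Int.mod n 10 > m then PySem.Int.mod n 10 else m)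
         = max m (PySem.Int.mod n 10) := by
      rw [max_def]; split_ifs <;> omega
    simp only [dite_eq_ite] at ih
    simp only [heq] at ih ⊢
    exact ih
  | case2 n m h =>
    rw [pvAMaxLoop, pvBMdLoop, if_neg h, if_neg h]

theorem pvBMdLoop_bounds (n m : Int) (h0 : 0 ≤ m) (h9 : m ≤ 9) :
    0 ≤ pvBMdLoop n m ∧ pvBMdLoop n m ≤ 9 := by
  induction n, m using pvBMdLoop.induct with
  | case1 n m h ih =>
    rw [pvBMdLoop, if_pos h]
    have hm : 0 ≤ PySem.Int.mod n 10 ∧ PySem.Int.mod n 10 ≤ 9 := by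
      rw [PySem.Int.mod_eq_emod_of_pos (by norm_num)]; omega
    exact ih (by omega) (by rw [max_def]; split_ifs <;> omega)
  | case2 n m h =>
    rw [pvBMdLoop, if_neg h]; exact ⟨h0, h9⟩

-- digit sum of a number < 1000
theorem pvASumLoop_small (t s : Int) (h0 : 0 ≤ t) (h : t < 1000) :
    pvASumLoop t s = s + t % 10 + (t / 10) % 10 + t / 100 := by
  rw [pvASumLoop]
  by_cases h1 : t > 0
  · rw [if_pos h1, PySem.Int.floordiv_eq_ediv_of_pos (by norm_num),
      PySem.Int.mod_eq_emod_of_pos (by norm_num), pvASumLoop]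
    by_cases h2 : t / 10 > 0
    · rw [if_pos h2, PySem.Int.floordiv_eq_ediv_of_pos (by norm_num),
        PySem.Int.mod_eq_emod_of_pos (by norm_num), pvASumLoop]
      by_cases h3 : t / 10 / 10 > 0
      · rw [if_pos h3, PySem.Int.floordiv_eq_ediv_of_pos (by norm_num),
          PySem.Int.mod_eq_emod_of_pos (by norm_num), pvASumLoop]
        have hz : ¬ (t / 10 / 10 / 10 > 0) := by omega
        rw [if_neg hz]; omega
      · rw [if_neg h3]; omega
    · rw [if_neg h2]; omega
  · rw [if_neg h1]; omega

theorem punctulB_eq (a b c : Int) : punctulB a b c = punctulB_alt a b c := by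
  have hab := pvBMdLoop_bounds a 0 (by norm_num) (by norm_num)
  have hbb := pvBMdLoop_bounds b 0 (by norm_num) (by norm_num)
  have hcb := pvBMdLoop_bounds c 0 (by norm_num) (by norm_num)
  have htemp : alipire [a, b, c]
      = 100 * pvBMdLoop a 0 + 10 * pvBMdLoop b 0 + pvBMdLoop c 0 := by
    simp [alipire, pvAMaxLoop_eq_pvBMdLoop]; ring
  have hsum : pvASumLoop (alipire [a, b, c]) 0
      = pvBMdLoop a 0 + pvBMdLoop b 0 + pvBMdLoop c 0 := by
    rw [htemp, pvASumLoop_small _ 0 (by omega) (by omega)]; omega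
  simp only [punctulB, punctulB_alt, maxdigit, hsum]
  by_cases h : pvBMdLoop a 0 + pvBMdLoop b 0 + pvBMdLoop c 0 < 4 <;> simp [h]

-- ===== VERDICT (by name: the statement is the Claim_ definition above) =====
theorem punctulB_spec : Claim_equal_punctulB := by
  intro a b c _
  unfold Spec_punctulB
  exact punctulB_eq a b c
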